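-- pv_equiv track=rewrite | github.com/soma2000-lang/hackathon2025 | src/agents/tools.py | get_question_priority
-- ===== SOURCE A (Python) =====
-- def get_question_priority(category: str) -> int:
--     """Assign priority to question categories (1 = highest priority)."""
--     priority_map = {
--         "Red Flags Questions": 1,
--         "Vital Signs Questions": 2,
--         "Symptom Details Questions": 3,
--         "Medical History Questions": 4,
--         "Past Medical History Questions": 5,
--         "Lifestyle Risk Factors Questions": 6,
--         "Psychosocial Questions": 7
--     }
--
--     # Find matching category (case-insensitive, partial match)
--     for key, priority in priority_map.items():
--         if any(word in category.lower() for word in key.lower().split()):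
--             return priority
--
--     return 8  # Default priority
-- ===== SOURCE B (Python) =====
-- # Inverted word->min-priority index; single pass taking the minimum matched priority (default 8).
-- _WORD_PRIORITY = {
--     "red": 1, "flags": 1, "questions": 1,
--     "vital": 2, "signs": 2,
--     "symptom": 3, "details": 3,
--     "medical": 4, "history": 4,
--     "past": 5,
--     "lifestyle": 6, "risk": 6, "factors": 6,
--     "psychosocial": 7,
-- }
--
-- def get_question_priority(category: str) -> int:
--     """Assign priority to question categories (1 = highest priority)."""
--     text = category.lower()
--     best = 8
--     for word, pri in _WORD_PRIORITY.items():
--         if word in text and pri < best: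
--             best = pri
--     return best
-- ===== Notes on version B (the rewrite author's own statement) =====
-- stated objective: alternative
-- what changed: Replaces the nested first-match loop over key phrases (splitting each key every call) by a precomputed inverted word-to-minimum-priority index scanned in a single flat pass taking the minimum matched priority, exploiting that priorities equal insertion order.
import Mathlib
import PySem

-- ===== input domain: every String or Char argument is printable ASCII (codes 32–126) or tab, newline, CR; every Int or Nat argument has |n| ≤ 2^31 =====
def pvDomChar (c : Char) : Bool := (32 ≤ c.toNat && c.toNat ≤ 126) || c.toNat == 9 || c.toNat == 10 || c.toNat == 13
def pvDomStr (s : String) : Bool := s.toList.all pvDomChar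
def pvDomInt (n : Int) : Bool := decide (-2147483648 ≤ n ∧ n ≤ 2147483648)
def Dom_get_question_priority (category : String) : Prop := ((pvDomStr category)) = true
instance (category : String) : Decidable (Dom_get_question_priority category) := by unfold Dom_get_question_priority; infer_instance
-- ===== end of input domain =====

-- B replaces A's first-match loop over key phrases by a precomputed word→min-priority
-- inverted index scanned once taking the minimum matched priority (objective: alternative).

-- ===== PORT A =====
-- the dict literal, in insertion order
def pvPriorityMap : List (String × Int) :=
  [("Red Flags Questions", 1), ("Vital Signs Questions", 2), ("Symptom Details Questions", 3),
   ("Medical History Questions", 4), ("Past Medical History Questions", 5),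
   ("Lifestyle Risk Factors Questions", 6), ("Psychosocial Questions", 7)]

-- the for-loop with early return: first key one of whose lowered words occurs in category.lower()
def pvLoopA (category : String) : List (String × Int) → Int
  | [] => 8
  | (key, priority) :: rest =>
      if (PySem.Str.split₀ (PySem.Str.lower key)).any
           (fun word => PySem.Str.isIn word (PySem.Str.lower category)) then
        priority
      else pvLoopA category rest

def get_question_priority (category : String) : Int :=
  pvLoopA category pvPriorityMap

-- ===== PORT B =====
def pvWordPriority : List (String × Int) :=
  [("red", 1), ("flags", 1), ("questions", 1), ("vital", 2), ("signs", 2),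
   ("symptom", 3), ("details", 3), ("medical", 4), ("history", 4), ("past", 5),
   ("lifestyle", 6), ("risk", 6), ("factors", 6), ("psychosocial", 7)]

def get_question_priority_alt (category : String) : Int :=
  let text := PySem.Str.lower category
  pvWordPriority.foldl
    (fun best wp => if PySem.Str.isIn wp.1 text && decide (wp.2 < best) then wp.2 else best) 8

-- ===== PRECONDITION & SPEC =====
def Spec_get_question_priority (category : String) (out : Int) : Prop := out = get_question_priority_alt category
instance (category : String) (out : Int) : Decidable (Spec_get_question_priority category out) := by unfold Spec_get_question_priority; infer_instance

-- ===== CLAIM (what is proved, stated in full; the proofs are below) =====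
def Claim_equal_get_question_priority : Prop := ∀ (category : String), Dom_get_question_priority category → Spec_get_question_priority category (get_question_priority category)

-- ===== LEMMAS AND PROOFS =====

-- the lowered key phrases split into their words (evaluated once, by kernel computation)
theorem pv_split_red : PySem.Str.split₀ (PySem.Str.lower "Red Flags Questions") = ["red", "flags", "questions"] := by decide
theorem pv_split_vital : PySem.Str.split₀ (PySem.Str.lower "Vital Signs Questions") = ["vital", "signs", "questions"] := by decide
theorem pv_split_symptom : PySem.Str.split₀ (PySem.Str.lower "Symptom Details Questions") = ["symptom", "details", "questions"] := by decide
theorem pv_split_medical : PySem.Str.split₀ (PySem.Str.lower "Medical History Questions") = ["medical", "history", "questions"] := by decide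
theorem pv_split_past : PySem.Str.split₀ (PySem.Str.lower "Past Medical History Questions") = ["past", "medical", "history", "questions"] := by decide
theorem pv_split_lifestyle : PySem.Str.split₀ (PySem.Str.lower "Lifestyle Risk Factors Questions") = ["lifestyle", "risk", "factors", "questions"] := by decide
theorem pv_split_psycho : PySem.Str.split₀ (PySem.Str.lower "Psychosocial Questions") = ["psychosocial", "questions"] := by decide

-- both results as a function of the 14 atomic substring tests: proved once over booleans
theorem pv_bool_table : ∀ (bred bflags bq bvital bsigns bsym bdet bmed bhist bpast blife brisk bfac bpsy : Bool),
    (if bred || (bflags || bq) then (1 : Int)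
     else if bvital || (bsigns || bq) then 2
     else if bsym || (bdet || bq) then 3
     else if bmed || (bhist || bq) then 4
     else if bpast || (bmed || (bhist || bq)) then 5
     else if blife || (brisk || (bfac || bq)) then 6
     else if bpsy || bq then 7
     else 8)
    =
    (List.foldl (fun (best : Int) (wp : Bool × Int) => if wp.1 && decide (wp.2 < best) then wp.2 else best) 8
      [(bred, 1), (bflags, 1), (bq, 1), (bvital, 2), (bsigns, 2), (bsym, 3), (bdet, 3),
       (bmed, 4), (bhist, 4), (bpast, 5), (blife, 6), (brisk, 6), (bfac, 6), (bpsy, 7)]) := by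
  decide

-- ===== VERDICT (by name: the statement is the Claim_ definition above) =====
theorem get_question_priority_spec : Claim_equal_get_question_priority := by
  intro category _
  unfold Spec_get_question_priority get_question_priority get_question_priority_alt pvPriorityMap pvWordPriority
  show pvLoopA category _ =
    List.foldl (fun (best : Int) (wp : String × Int) =>
      if PySem.Str.isIn wp.1 (PySem.Str.lower category) && decide (wp.2 < best) then wp.2 else best) 8 _
  rw [show (List.foldl (fun (best : Int) (wp : String × Int) =>
        if PySem.Str.isIn wp.1 (PySem.Str.lower category) && decide (wp.2 < best) then wp.2 else best) 8
        [("red", 1), ("flags", 1), ("questions", 1), ("vital", 2), ("signs", 2),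
         ("symptom", 3), ("details", 3), ("medical", 4), ("history", 4), ("past", 5),
         ("lifestyle", 6), ("risk", 6), ("factors", 6), ("psychosocial", 7)])
      = List.foldl (fun (best : Int) (wp : Bool × Int) =>
          if wp.1 && decide (wp.2 < best) then wp.2 else best) 8
        ([("red", (1:Int)), ("flags", 1), ("questions", 1), ("vital", 2), ("signs", 2),
          ("symptom", 3), ("details", 3), ("medical", 4), ("history", 4), ("past", 5),
          ("lifestyle", 6), ("risk", 6), ("factors", 6), ("psychosocial", 7)].map
          (fun wp => (PySem.Str.isIn wp.1 (PySem.Str.lower category), wp.2)))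
      from by rw [List.foldl_map]]
  simp only [List.map_cons, List.map_nil]
  simp only [pvLoopA, pv_split_red, pv_split_vital, pv_split_symptom, pv_split_medical,
    pv_split_past, pv_split_lifestyle, pv_split_psycho, List.any_cons, List.any_nil, Bool.or_false]
  generalize PySem.Str.isIn "red" (PySem.Str.lower category) = bred
  generalize PySem.Str.isIn "flags" (PySem.Str.lower category) = bflags
  generalize PySem.Str.isIn "questions" (PySem.Str.lower category) = bq
  generalize PySem.Str.isIn "vital" (PySem.Str.lower category) = bvital
  generalize PySem.Str.isIn "signs" (PySem.Str.lower category) = bsigns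
  generalize PySem.Str.isIn "symptom" (PySem.Str.lower category) = bsym
  generalize PySem.Str.isIn "details" (PySem.Str.lower category) = bdet
  generalize PySem.Str.isIn "medical" (PySem.Str.lower category) = bmed
  generalize PySem.Str.isIn "history" (PySem.Str.lower category) = bhist
  generalize PySem.Str.isIn "past" (PySem.Str.lower category) = bpast
  generalize PySem.Str.isIn "lifestyle" (PySem.Str.lower category) = blife
  generalize PySem.Str.isIn "risk" (PySem.Str.lower category) = brisk
  generalize PySem.Str.isIn "factors" (PySem.Str.lower category) = bfac
  generalize PySem.Str.isIn "psychosocial" (PySem.Str.lower category) = bpsy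
  exact pv_bool_table bred bflags bq bvital bsigns bsym bdet bmed bhist bpast blife brisk bfac bpsy
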